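-- pv_equiv track=rewrite | github.com/bpalmer0/aoc23 | day14/main.py | do_cycle
-- ===== SOURCE A (Python) =====
-- from typing import List
--
-- def process_column(column: List[str]) -> None:
--     next_space = len(column) - 1
--     for i in range(len(column) - 1, -1, -1):
--         c = column[i]
--         if c == "#":
--             next_space = i - 1
--         elif c == "O":
--             column[next_space] = column[i]
--             if i != next_space:
--                 column[i] = "."
--             next_space -= 1
--
-- def rotate(grid: List[List[str]]) -> List[List[str]]:
--     new_grid = []
--     for col in range(len(grid[0])):
--         new_row = []
--         for row in range(len(grid) - 1, -1, -1):
--             new_row.append(grid[row][col])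
--         new_grid.append(new_row)
--     return new_grid
--
-- def do_cycle(grid: List[List[str]]) -> List[List[str]]:
--     grid = rotate(grid)
--     for direction in range(4):
--         for row in grid:
--             process_column(row)
--         grid = rotate(grid)
--     for _ in range(3):
--         grid = rotate(grid)
--     return grid
-- ===== SOURCE B (Python) =====
-- from typing import List
--
-- def _pack_low(seg: List[str]) -> List[str]:
--     k = seg.count("O")
--     return ["O"] * k + ["." if c == "O" else c for c in seg[k:]]
--
-- def _slide_low(line: List[str]) -> List[str]:
--     out = []
--     seg = []
--     for c in line:
--         if c == "#":
--             out.extend(_pack_low(seg))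
--             out.append("#")
--             seg = []
--         else:
--             seg.append(c)
--     out.extend(_pack_low(seg))
--     return out
--
-- def _slide_high(line: List[str]) -> List[str]:
--     return _slide_low(line[::-1])[::-1]
--
-- def do_cycle(grid: List[List[str]]) -> List[List[str]]:
--     w = len(grid[0])
--     g = [[row[c] for c in range(w)] for row in grid]
--     h = len(g)
--     # North: slide each column toward index 0
--     cols = [_slide_low([row[c] for row in g]) for c in range(w)]
--     g = [[cols[c][r] for c in range(w)] for r in range(h)]
--     # West: slide each row toward index 0
--     g = [_slide_low(row) for row in g]
--     # South: slide each column toward the end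
--     cols = [_slide_high([row[c] for row in g]) for c in range(w)]
--     g = [[cols[c][r] for c in range(w)] for r in range(h)]
--     # East: slide each row toward the end
--     g = [_slide_high(row) for row in g]
--     return g
-- ===== Notes on version B (the rewrite author's own statement) =====
-- stated objective: simpler
-- what changed: B drops the rotate() conjugation entirely: it copies the grid once and applies four explicit directional tilts (N,W,S,E), each tilt computed per '#'-separated segment by counting the 'O's and rebuilding the segment (count-and-pack) instead of A's stateful next_space sweep over eight successive grid rotations.
-- crash fix: On non-empty grids whose first row is empty (width 0) A raises IndexError inside the second rotate() call, while B returns the grid of empty rows unchanged. — e.g. on do_cycle([[]]): A raises IndexError, B returns [[]]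
import Mathlib
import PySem

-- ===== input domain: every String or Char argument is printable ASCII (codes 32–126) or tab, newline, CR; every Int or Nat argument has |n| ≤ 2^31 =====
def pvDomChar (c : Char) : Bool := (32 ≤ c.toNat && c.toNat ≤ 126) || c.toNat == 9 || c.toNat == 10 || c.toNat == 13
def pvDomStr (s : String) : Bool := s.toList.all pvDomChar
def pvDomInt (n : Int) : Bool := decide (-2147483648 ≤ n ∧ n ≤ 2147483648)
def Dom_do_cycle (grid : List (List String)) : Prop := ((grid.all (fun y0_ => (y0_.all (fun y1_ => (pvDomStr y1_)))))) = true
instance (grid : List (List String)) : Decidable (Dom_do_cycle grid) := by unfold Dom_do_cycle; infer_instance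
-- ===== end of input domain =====

-- B replaces A's eight grid rotations and stateful next_space sweep by four explicit
-- directional tilts computed per '#'-separated segment (count the 'O's, rebuild); return
-- values only (neither program mutates its argument).

-- ===== PORT A =====
-- process_column: in-place sweep from the top index down, state = (list, next_space)
def pcStep (st : List String × Int) (i : Int) : List String × Int :=
  let c := PySem.List.pyGetD st.1 i ""
  if c = "#" then (st.1, i - 1)
  else if c = "O" then
    let col1 := PySem.List.pySetD st.1 st.2 c
    let col2 := if i ≠ st.2 then PySem.List.pySetD col1 i "." else col1
    (col2, st.2 - 1)
  else st

def processColumn (col : List String) : List String :=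
  ((PySem.List.pyRange ((col.length : Int) - 1) (-1) (-1)).foldl pcStep
    (col, (col.length : Int) - 1)).1

def rotateA (grid : List (List String)) : List (List String) :=
  (PySem.List.pyRange 0 ((grid.headD []).length : Int) 1).map (fun c =>
    (PySem.List.pyRange ((grid.length : Int) - 1) (-1) (-1)).map (fun r =>
      PySem.List.pyGetD (PySem.List.pyGetD grid r []) c ""))

def do_cycle (grid : List (List String)) : List (List String) :=
  let g := rotateA grid
  let g := (List.range 4).foldl (fun g _ => rotateA (g.map processColumn)) g
  (List.range 3).foldl (fun g _ => rotateA g) g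

-- ===== PORT B =====
def dotc (c : String) : String := if c = "O" then "." else c

-- _pack_low: k leading "O"s, then the rest of the segment with its "O"s dotted out
def packLow (seg : List String) : List String :=
  List.replicate (seg.count "O") "O" ++
    (PySem.List.slice seg (some ((seg.count "O" : Nat) : Int)) none).map dotc

def slStep (st : List String × List String) (c : String) : List String × List String :=
  if c = "#" then (st.1 ++ packLow st.2 ++ ["#"], []) else (st.1, st.2 ++ [c])

def slideLow (line : List String) : List String :=
  let st := line.foldl slStep ([], [])
  st.1 ++ packLow st.2

-- line[::-1] is List.reverse (PySem.List.slice?_none_none_neg_one)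
def slideHigh (line : List String) : List String := (slideLow line.reverse).reverse

def do_cycle_alt (grid : List (List String)) : List (List String) :=
  let w : Int := ((grid.headD []).length : Int)
  let g := grid.map (fun row => (PySem.List.pyRange 0 w 1).map (fun c => PySem.List.pyGetD row c ""))
  let h : Int := (g.length : Int)
  let cols := (PySem.List.pyRange 0 w 1).map (fun c => slideLow (g.map (fun row => PySem.List.pyGetD row c "")))
  let g := (PySem.List.pyRange 0 h 1).map (fun r => (PySem.List.pyRange 0 w 1).map (fun c => PySem.List.pyGetD (PySem.List.pyGetD cols c []) r ""))
  let g := g.map slideLow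
  let cols := (PySem.List.pyRange 0 w 1).map (fun c => slideHigh (g.map (fun row => PySem.List.pyGetD row c "")))
  let g := (PySem.List.pyRange 0 h 1).map (fun r => (PySem.List.pyRange 0 w 1).map (fun c => PySem.List.pyGetD (PySem.List.pyGetD cols c []) r ""))
  g.map slideHigh

-- ===== PRECONDITION & SPEC =====
-- Pre_ excludes exactly the inputs where A raises IndexError: the empty grid, a grid whose
-- first row is empty (rotate([]) then indexes [][0]) and grids with a row shorter than the
-- first row (rotate indexes past its end); A returns on everything admitted.
def Pre_do_cycle (grid : List (List String)) : Prop :=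
  grid ≠ [] ∧ 0 < (grid.headD []).length ∧
    ∀ row ∈ grid, (grid.headD []).length ≤ row.length
instance (grid : List (List String)) : Decidable (Pre_do_cycle grid) := by
  unfold Pre_do_cycle; infer_instance

def pvWitness_do_cycle : List (List String) :=
  [["O", ".", "#"], [".", "O", "."], ["#", ".", "O"]]

-- On non-empty grids whose first row is empty (width 0) A raises IndexError inside the
-- second rotate() call, while B returns the grid of empty rows unchanged.
def Raises_do_cycle (grid : List (List String)) : Prop :=
  grid ≠ [] ∧ (grid.headD []).length = 0
instance (grid : List (List String)) : Decidable (Raises_do_cycle grid) := by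
  unfold Raises_do_cycle; infer_instance
def pvRaiseWitness_do_cycle : List (List String) := [[]]
def pvRaiseWitnessOut_do_cycle : List (List String) := [[]]

def Spec_do_cycle (grid : List (List String)) (out : List (List String)) : Prop := out = do_cycle_alt grid
instance (grid : List (List String)) (out : List (List String)) : Decidable (Spec_do_cycle grid out) := by unfold Spec_do_cycle; infer_instance

-- ===== CLAIM (what is proved, stated in full; the proofs are below) =====
def Claim_equal_do_cycle : Prop := ∀ (grid : List (List String)), Dom_do_cycle grid → Pre_do_cycle grid → Spec_do_cycle grid (do_cycle grid)

def Claim_raises_do_cycle : Prop := (∀ (grid : List (List String)), Dom_do_cycle grid → Raises_do_cycle grid → ¬ Pre_do_cycle grid) ∧ (Dom_do_cycle (pvRaiseWitness_do_cycle) ∧ Raises_do_cycle (pvRaiseWitness_do_cycle) ∧ do_cycle_alt (pvRaiseWitness_do_cycle) = pvRaiseWitnessOut_do_cycle)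

-- ===== LEMMAS AND PROOFS =====

-- ---- generic list helpers ----
theorem pvLenTake {α : Type} (l : List α) (i : Nat) (h : i ≤ l.length) :
    (l.take i).length = i := by
  rw [List.length_take, min_eq_left h]

theorem pvGetD_append_length {α : Type} (pre : List α) (x : α) (suf : List α) (d : α) :
    (pre ++ x :: suf).getD pre.length d = x := by
  rw [List.getD_eq_getElem?_getD, List.getElem?_append_right le_rfl]
  simp

theorem pvSet_append_length {α : Type} (pre : List α) (rest : List α) (k : Nat) (v : α) :
    (pre ++ rest).set (pre.length + k) v = pre ++ rest.set k v := by
  rw [List.set_append]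
  simp

theorem pvSetAtLen {α : Type} (pre : List α) (x : α) (suf : List α) (v : α) (n : Nat)
    (h : pre.length = n) : (pre ++ x :: suf).set n v = pre ++ v :: suf := by
  subst h
  simpa using pvSet_append_length pre (x :: suf) 0 v

theorem pvSetAt {α : Type} (pre rest : List α) (n m : Nat) (v : α)
    (h : pre.length = n) : (pre ++ rest).set (n + m) v = pre ++ rest.set m v := by
  subst h
  exact pvSet_append_length pre rest m v

theorem pvGetDAtLen {α : Type} (pre : List α) (x : α) (suf : List α) (d : α) (n : Nat)
    (h : pre.length = n) : (pre ++ x :: suf).getD n d = x := by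
  subst h
  exact pvGetD_append_length pre x suf d

theorem pvTakePosCons {α : Type} (a : α) (l : List α) (m : Nat) (h : 0 < m) :
    (a :: l).take m = a :: l.take (m - 1) := by
  cases m with
  | zero => omega
  | succ m' => simp [List.take_succ_cons]

theorem pvSetPosCons {α : Type} (a : α) (l : List α) (m : Nat) (v : α) (h : 0 < m) :
    (a :: l).set m v = a :: l.set (m - 1) v := by
  cases m with
  | zero => omega
  | succ m' => simp [List.set_cons_succ]

theorem pvNeNilOfLen {α : Type} (l : List α) (n : Nat) (h : l.length = n) (hn : 0 < n) :
    l ≠ [] := by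
  intro e
  rw [e] at h
  simp at h
  omega

theorem pvMapRangeGetD {α β : Type} (l : List α) (d : α) (f : α → β) :
    (List.range l.length).map (fun i => f (l.getD i d)) = l.map f := by
  apply List.ext_getElem?
  intro j
  by_cases hj : j < l.length
  · rw [List.getElem?_map, List.getElem?_range hj, List.getElem?_map,
      List.getElem?_eq_getElem hj]
    simp [List.getD_eq_getElem?_getD, List.getElem?_eq_getElem hj]
  · rw [List.getElem?_map, List.getElem?_map,
      List.getElem?_eq_none (by simpa using hj),
      List.getElem?_eq_none (by simpa using hj)]
    rfl

theorem pvMapRangeGetD_self {α : Type} (l : List α) (d : α) :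
    (List.range l.length).map (fun i => l.getD i d) = l := by
  have h := pvMapRangeGetD l d id
  simpa using h

theorem pvGetD_map_range {α : Type} (f : Nat → α) (w k : Nat) (d : α) (h : k < w) :
    ((List.range w).map f).getD k d = f k := by
  rw [List.getD_eq_getElem?_getD, List.getElem?_map, List.getElem?_range h]
  rfl

theorem pvHeadD_map {α β : Type} (g : List α) (f : α → β) (d₁ : β) (d₂ : α)
    (hg : g ≠ []) : (g.map f).headD d₁ = f (g.headD d₂) := by
  cases g with
  | nil => exact absurd rfl hg
  | cons a t => rfl

theorem pvHeadD_map_range {α : Type} (F : Nat → α) (w : Nat) (d : α) (hw : 0 < w) :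
    ((List.range w).map F).headD d = F 0 := by
  cases w with
  | zero => omega
  | succ n => rw [List.range_succ_eq_map]; rfl

theorem pvDropWhile_head_false {p : String → Bool} :
    ∀ (l : List String) (hd : String) (tl : List String),
      l.dropWhile p = hd :: tl → p hd = false := by
  intro l
  induction l with
  | nil => intro hd tl h; simp [List.dropWhile] at h
  | cons a t ih =>
    intro hd tl h
    by_cases hp : p a
    · rw [List.dropWhile_cons_of_pos hp] at h; exact ih hd tl h
    · rw [List.dropWhile_cons_of_neg hp] at h
      cases h
      simpa using hp

-- ---- slideLow / packLow structure ----
theorem packLow_eq (l : List String) :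
    packLow l = List.replicate (l.count "O") "O" ++ (l.drop (l.count "O")).map dotc := by
  unfold packLow
  rw [PySem.List.slice_from_natCast]

theorem packLow_nil : packLow [] = [] := by decide

theorem len_packLow (l : List String) : (packLow l).length = l.length := by
  rw [packLow_eq]
  have := List.count_le_length (a := "O") (l := l)
  simp
  omega

def packHigh (l : List String) : List String := (packLow l.reverse).reverse

theorem foldl_slStep_hashfree :
    ∀ (l : List String), "#" ∉ l → ∀ (out seg : List String),
      l.foldl slStep (out, seg) = (out, seg ++ l) := by
  intro l
  induction l with
  | nil => intro _ out seg; simp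
  | cons c t ih =>
    intro h out seg
    have hc : ¬ c = "#" := fun e => h (List.mem_cons.mpr (Or.inl e.symm))
    simp only [List.foldl_cons, slStep, if_neg hc]
    rw [ih (fun m => h (List.mem_cons_of_mem _ m)) out (seg ++ [c])]
    simp

theorem slideLow_hashfree (l : List String) (h : "#" ∉ l) : slideLow l = packLow l := by
  unfold slideLow
  rw [foldl_slStep_hashfree l h]
  simp

theorem slideLow_append_hash (u v : List String) (hv : "#" ∉ v) :
    slideLow (u ++ "#" :: v) = slideLow u ++ "#" :: packLow v := by
  unfold slideLow
  rw [List.foldl_append]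
  simp only [List.foldl_cons]
  have h1 : slStep (u.foldl slStep ([], [])) "#" =
      ((u.foldl slStep ([], [])).1 ++ packLow (u.foldl slStep ([], [])).2 ++ ["#"], []) := by
    simp [slStep]
  rw [h1, foldl_slStep_hashfree v hv]
  simp [List.append_assoc]

theorem slideLow_concat_hash (u : List String) :
    slideLow (u ++ ["#"]) = slideLow u ++ ["#"] := by
  have h := slideLow_append_hash u [] (by simp)
  simpa [packLow_nil] using h

theorem slideHigh_nil : slideHigh [] = [] := by decide

theorem slideHigh_reverse (l : List String) : slideHigh l.reverse = (slideLow l).reverse := by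
  simp [slideHigh]

theorem slideHigh_cons_hash (b : List String) :
    slideHigh ("#" :: b) = "#" :: slideHigh b := by
  unfold slideHigh
  rw [show ("#" :: b).reverse = b.reverse ++ ["#"] from by simp, slideLow_concat_hash]
  simp

theorem slideHigh_hashfree (a : List String) (h : "#" ∉ a) : slideHigh a = packHigh a := by
  unfold slideHigh packHigh
  rw [slideLow_hashfree _ (by simpa using h)]

theorem slideHigh_append_hash (a b : List String) (ha : "#" ∉ a) :
    slideHigh (a ++ "#" :: b) = packHigh a ++ "#" :: slideHigh b := by
  unfold slideHigh packHigh
  rw [show (a ++ "#" :: b).reverse = b.reverse ++ "#" :: a.reverse from by simp,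
    slideLow_append_hash _ _ (by simpa using ha)]
  simp

theorem packHigh_eq (l : List String) :
    packHigh l = (l.map dotc).take (l.length - l.count "O") ++
      List.replicate (l.count "O") "O" := by
  unfold packHigh
  rw [packLow_eq]
  rw [List.reverse_append, List.reverse_replicate, List.count_reverse]
  congr 1
  rw [← List.map_reverse, List.reverse_drop, List.reverse_reverse, List.length_reverse,
    List.map_take]

theorem len_slideLow (l : List String) : (slideLow l).length = l.length := by
  have key : ∀ (l out seg : List String),
      (l.foldl slStep (out, seg)).1.length + (l.foldl slStep (out, seg)).2.length =
        out.length + seg.length + l.length := by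
    intro l
    induction l with
    | nil => intro out seg; simp
    | cons c t ih =>
      intro out seg
      by_cases hc : c = "#"
      · subst hc
        simp only [List.foldl_cons, slStep, if_true]
        have h := ih (out ++ packLow seg ++ ["#"]) []
        simp [len_packLow] at h ⊢
        omega
      · simp only [List.foldl_cons, slStep, if_neg hc]
        have h := ih out (seg ++ [c])
        simp at h ⊢
        omega
  unfold slideLow
  have h := key l [] []
  simp [len_packLow] at h ⊢
  omega

theorem len_slideHigh (l : List String) : (slideHigh l).length = l.length := by
  simp [slideHigh, len_slideLow]

-- ---- the decomposition of slideHigh used by the sweep invariant ----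
theorem slideHigh_decomp (l : List String) :
    slideHigh l = packHigh (l.takeWhile (fun c => !(c == "#"))) ++
      (match l.dropWhile (fun c => !(c == "#")) with
       | [] => ([] : List String)
       | _ :: b => "#" :: slideHigh b) := by
  have hfree : "#" ∉ l.takeWhile (fun c => !(c == "#")) := by
    intro hm
    have := List.mem_takeWhile_imp hm
    simp at this
  cases hdw : l.dropWhile (fun c => !(c == "#")) with
  | nil =>
    have hl : l = l.takeWhile (fun c => !(c == "#")) := by
      conv_lhs => rw [← List.takeWhile_append_dropWhile (p := fun c => !(c == "#")) (l := l)]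
      rw [hdw, List.append_nil]
    rw [List.append_nil, ← slideHigh_hashfree _ hfree, ← hl]
  | cons hd b =>
    have hhd : hd = "#" := by
      have := pvDropWhile_head_false l hd b hdw
      simpa using this
    subst hhd
    have hl : l = l.takeWhile (fun c => !(c == "#")) ++ "#" :: b := by
      conv_lhs => rw [← List.takeWhile_append_dropWhile (p := fun c => !(c == "#")) (l := l)]
      rw [hdw]
    conv_lhs => rw [hl]
    rw [slideHigh_append_hash _ _ hfree]

-- ---- the sweep invariant for process_column ----
theorem pvProdEq {α β : Type} {a c : α} {b d : β} (h1 : a = c) (h2 : b = d) :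
    (a, b) = (c, d) := by rw [h1, h2]

def pvAPart (col : List String) (i : Nat) : List String :=
  (col.drop i).takeWhile (fun c => !(c == "#"))

def pvNonO (l : List String) : Nat := l.length - l.count "O"

def pvState (col : List String) (i : Nat) : List String × Int :=
  (col.take i ++ slideHigh (col.drop i), (i : Int) - 1 + (pvNonO (pvAPart col i) : Int))

theorem pc_step_eq (col : List String) (i : Nat) (hi : i < col.length) :
    pcStep (pvState col (i + 1)) (i : Int) = pvState col i := by
  have hlt : (col.take i).length = i := pvLenTake col i (le_of_lt hi)
  have hdrop : col.drop i = col[i] :: col.drop (i + 1) := List.drop_eq_getElem_cons hi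
  have htake : col.take (i + 1) = col.take i ++ [col[i]] := by
    rw [List.take_succ, List.getElem?_eq_getElem hi]
    rfl
  set A := pvAPart col (i + 1) with hA
  set k := A.count "O" with hk
  have hkA : k ≤ A.length := List.count_le_length
  set m := A.length - k with hm
  set TL : List String :=
    (match (col.drop (i+1)).dropWhile (fun c => !(c == "#")) with
     | [] => ([] : List String)
     | _ :: b => "#" :: slideHigh b) with hTL
  have hA' : (col.drop (i+1)).takeWhile (fun c => !(c == "#")) = A := by
    rw [hA]
    unfold pvAPart
    rfl
  have hdecomp : slideHigh (col.drop (i+1)) = packHigh A ++ TL := by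
    rw [slideHigh_decomp (col.drop (i+1)), hA', ← hTL]
  have hs1 : (pvState col (i + 1)).1 = col.take i ++ col[i] :: (packHigh A ++ TL) := by
    simp only [pvState]
    rw [htake, hdecomp, List.append_assoc]
    rfl
  have hnm : pvNonO A = m := by
    unfold pvNonO
    rw [hm, hk]
  have hs2 : (pvState col (i + 1)).2 = (i : Int) + (m : Int) := by
    simp only [pvState]
    rw [← hA, hnm]
    push_cast
    ring
  have hstate : pvState col i =
      (col.take i ++ slideHigh (col.drop i),
        (i : Int) - 1 + (pvNonO (pvAPart col i) : Int)) := rfl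
  have hread : PySem.List.pyGetD (pvState col (i + 1)).1 (i : Int) "" = col[i] := by
    rw [PySem.List.pyGetD_natCast, hs1]
    exact pvGetDAtLen (col.take i) col[i] (packHigh A ++ TL) "" i hlt
  have hdecompCons : ∀ (x : String), ¬ x = "#" →
      slideHigh (x :: col.drop (i+1)) = packHigh (x :: A) ++ TL := by
    intro x hx
    rw [slideHigh_decomp (x :: col.drop (i+1)),
      List.takeWhile_cons_of_pos (by simp [hx]), List.dropWhile_cons_of_pos (by simp [hx]),
      hA', ← hTL]
  by_cases hH : col[i] = "#"
  · -- '#': next_space := i - 1, list unchanged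
    have hstep : pcStep (pvState col (i+1)) (i : Int) = ((pvState col (i+1)).1, (i : Int) - 1) := by
      simp only [pcStep]
      rw [hread, hH, if_pos rfl]
    rw [hstep, hstate]
    refine pvProdEq ?_ ?_
    · rw [hs1, hdrop, hH, slideHigh_cons_hash, hdecomp]
    · have hAi : pvAPart col i = [] := by
        unfold pvAPart
        rw [hdrop, hH, List.takeWhile_cons_of_neg (by simp)]
      rw [hAi]
      simp [pvNonO]
  · by_cases hO : col[i] = "O"
    · -- 'O': place at next_space, dot the source if it moved
      have hAi : pvAPart col i = "O" :: A := by
        unfold pvAPart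
        rw [hdrop, hO, List.takeWhile_cons_of_pos (by simp), hA']
      have hpH : packHigh A = (A.map dotc).take m ++ List.replicate k "O" := by
        rw [packHigh_eq, ← hk, ← hm]
      have hpackO : packHigh ("O" :: A) =
          ("." :: A.map dotc).take m ++ "O" :: List.replicate k "O" := by
        rw [packHigh_eq]
        have h1 : ("O" :: A).count "O" = k + 1 := by rw [List.count_cons_self, hk]
        have h2 : ("O" :: A).length - ("O" :: A).count "O" = m := by
          rw [h1]
          simp only [List.length_cons]
          omega
        rw [h2, h1]
        simp [dotc, List.replicate_succ]
      have hnonO : pvNonO ("O" :: A) = m := by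
        unfold pvNonO
        rw [List.count_cons_self, ← hk]
        simp only [List.length_cons]
        omega
      cases Nat.eq_zero_or_pos m with
      | inl hm0 =>
        -- the rock does not move: i = next_space
        have hns : (pvState col (i+1)).2 = (i : Int) := by rw [hs2, hm0]; simp
        have hset : PySem.List.pySetD (pvState col (i+1)).1 (pvState col (i+1)).2 col[i] =
            col.take i ++ "O" :: (packHigh A ++ TL) := by
          rw [hns, PySem.List.pySetD_natCast, hs1, hO]
          exact pvSetAtLen (col.take i) "O" (packHigh A ++ TL) "O" i hlt
        have hstep : pcStep (pvState col (i+1)) (i : Int) =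
            (col.take i ++ "O" :: (packHigh A ++ TL), (pvState col (i+1)).2 - 1) := by
          simp only [pcStep]
          rw [hread, hO, if_neg (by decide : ¬ ("O" : String) = "#"), if_pos rfl]
          rw [hO] at hset
          rw [hset, if_neg (by rw [hns]; simp)]
        rw [hstep, hstate]
        refine pvProdEq ?_ ?_
        · rw [hdrop, hO, hdecompCons "O" (by decide), hpackO, hm0, hpH, hm0]
          simp
        · rw [hAi, hnonO, hns, hm0]
          simp
      | inr hmpos =>
        -- the rock moves m places up
        have hmlen : m ≤ (A.map dotc).length := by
          rw [List.length_map]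
          omega
        have hPlen : ((A.map dotc).take m).length = m := pvLenTake _ m hmlen
        have hns2 : (pvState col (i+1)).2 = ((i + m : Nat) : Int) := by
          rw [hs2]; push_cast; ring
        have hset1 : PySem.List.pySetD (pvState col (i+1)).1 (pvState col (i+1)).2 col[i] =
            col.take i ++ "O" :: (((A.map dotc).take (m-1) ++ ["O"]) ++
              (List.replicate k "O" ++ TL)) := by
          rw [hns2, PySem.List.pySetD_natCast, hs1, hO,
            pvSetAt (col.take i) ("O" :: (packHigh A ++ TL)) i m "O" hlt]
          congr 1
          rw [hpH, pvSetPosCons _ _ _ _ hmpos]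
          congr 1
          rw [List.append_assoc, List.set_append, if_pos (by rw [hPlen]; omega),
            List.set_eq_take_cons_drop _ (by rw [hPlen]; omega),
            List.take_take, min_eq_left (by omega),
            List.drop_eq_nil_of_le (by rw [hPlen]; omega)]
        have hset2 : PySem.List.pySetD
            (col.take i ++ "O" :: (((A.map dotc).take (m-1) ++ ["O"]) ++
              (List.replicate k "O" ++ TL))) (i : Int) "." =
            col.take i ++ "." :: (((A.map dotc).take (m-1) ++ ["O"]) ++
              (List.replicate k "O" ++ TL)) := by
          rw [PySem.List.pySetD_natCast]
          exact pvSetAtLen (col.take i) "O" _ "." i hlt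
        have hstep : pcStep (pvState col (i+1)) (i : Int) =
            (col.take i ++ "." :: (((A.map dotc).take (m-1) ++ ["O"]) ++
              (List.replicate k "O" ++ TL)), (pvState col (i+1)).2 - 1) := by
          simp only [pcStep]
          rw [hread, hO, if_neg (by decide : ¬ ("O" : String) = "#"), if_pos rfl]
          rw [hO] at hset1
          rw [hset1, if_pos (by rw [hns2]; push_cast; omega), hset2]
        rw [hstep, hstate]
        refine pvProdEq ?_ ?_
        · rw [hdrop, hO, hdecompCons "O" (by decide), hpackO,
            pvTakePosCons "." (A.map dotc) m hmpos]
          simp [List.append_assoc]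
        · rw [hAi, hnonO, hs2]
          ring
    · -- any other cell: nothing happens
      have hstep : pcStep (pvState col (i+1)) (i : Int) = pvState col (i+1) := by
        simp only [pcStep]
        rw [hread, if_neg hH, if_neg hO]
      rw [hstep, hstate]
      have hAi : pvAPart col i = col[i] :: A := by
        unfold pvAPart
        rw [hdrop, List.takeWhile_cons_of_pos (by simp [hH]), hA']
      have hpcons : packHigh (col[i] :: A) = col[i] :: packHigh A := by
        rw [packHigh_eq, packHigh_eq, ← hk, List.count_cons_of_ne hO]
        have h2 : (col[i] :: A).length - k = (A.length - k) + 1 := by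
          simp only [List.length_cons]
          omega
        rw [h2]
        simp [dotc, hO, List.take_succ_cons, ← hk, ← hm]
      refine pvProdEq ?_ ?_
      · rw [htake, hdecomp, hdrop, hdecompCons col[i] hH, hpcons, List.append_assoc]
        simp
      · have hx : pvNonO (col[i] :: A) = m + 1 := by
          unfold pvNonO
          rw [List.count_cons_of_ne hO, ← hk]
          simp only [List.length_cons]
          omega
        rw [hAi, hx, ← hA, hnm]
        push_cast
        ring

theorem pc_fold (col : List String) :
    ∀ (i : Nat), i ≤ col.length →
      (PySem.List.pyRange ((i : Int) - 1) (-1) (-1)).foldl pcStep (pvState col i) =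
        pvState col 0 := by
  intro i
  induction i with
  | zero =>
    intro _
    rw [show ((0 : Nat) : Int) - 1 = -1 from by norm_num,
      PySem.List.pyRange_neg_one_eq_nil le_rfl]
    rfl
  | succ j ih =>
    intro h
    rw [show ((j + 1 : Nat) : Int) - 1 = (j : Int) from by push_cast; ring,
      PySem.List.pyRange_neg_one_cons (show (-1 : Int) < (j : Int) by omega),
      List.foldl_cons, pc_step_eq col j (by omega)]
    exact ih (by omega)

theorem processColumn_eq (col : List String) : processColumn col = slideHigh col := by
  unfold processColumn
  have h0 : (col, (col.length : Int) - 1) = pvState col col.length := by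
    simp only [pvState, pvAPart, pvNonO]
    simp [slideHigh_nil]
  rw [h0, pc_fold col col.length le_rfl]
  simp [pvState]

-- ---- grid algebra: columns, transpose, clockwise rotation ----
def pvColGet (g : List (List String)) (c : Nat) : List String :=
  g.map (fun row => row.getD c "")

def pvT (g : List (List String)) : List (List String) :=
  (List.range (g.headD []).length).map (pvColGet g)

def pvR (g : List (List String)) : List (List String) :=
  (List.range (g.headD []).length).map (fun c => (pvColGet g c).reverse)

def pvRect (w : Nat) (g : List (List String)) : Prop := ∀ row ∈ g, row.length = w

theorem length_pvColGet (g : List (List String)) (c : Nat) :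
    (pvColGet g c).length = g.length := by simp [pvColGet]

theorem pvHeadD_length {w : Nat} {g : List (List String)} (hg : g ≠ []) (hr : pvRect w g) :
    (g.headD []).length = w := by
  cases g with
  | nil => exact absurd rfl hg
  | cons a t => exact hr a (by simp)

theorem pvRect_reverse {w : Nat} {g : List (List String)} (hr : pvRect w g) :
    pvRect w g.reverse := by
  intro row hrow
  exact hr row (List.mem_reverse.mp hrow)

theorem pvRect_map {w : Nat} {g : List (List String)} (f : List String → List String)
    (hf : ∀ l, (f l).length = l.length) (hr : pvRect w g) : pvRect w (g.map f) := by
  intro row hrow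
  obtain ⟨r, hrm, rfl⟩ := List.mem_map.mp hrow
  rw [hf, hr r hrm]

theorem pvRect_pvT (g : List (List String)) : pvRect g.length (pvT g) := by
  intro row hrow
  obtain ⟨c, _, rfl⟩ := List.mem_map.mp hrow
  exact length_pvColGet g c

theorem length_pvT {w : Nat} {g : List (List String)} (hg : g ≠ []) (hr : pvRect w g) :
    (pvT g).length = w := by
  simp only [pvT, List.length_map, List.length_range]
  exact pvHeadD_length hg hr

theorem pvT_ne_nil {w : Nat} {g : List (List String)} (hg : g ≠ []) (hr : pvRect w g)
    (hw : 0 < w) : pvT g ≠ [] := by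
  intro e
  have := length_pvT hg hr
  rw [e] at this
  simp at this
  omega

theorem pvR_eq_pvT_map (g : List (List String)) : pvR g = (pvT g).map List.reverse := by
  simp only [pvR, pvT, List.map_map]
  rfl

theorem pvColGet_reverse (g : List (List String)) (c : Nat) :
    pvColGet g.reverse c = (pvColGet g c).reverse := by
  simp [pvColGet, List.map_reverse]

theorem pvR_eq_pvT_reverse {w : Nat} {g : List (List String)} (hg : g ≠ [])
    (hr : pvRect w g) : pvR g = pvT g.reverse := by
  unfold pvR pvT
  rw [pvHeadD_length hg hr,
    pvHeadD_length (by simp [hg]) (pvRect_reverse hr)]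
  exact (List.map_congr_left (fun c _ => (pvColGet_reverse g c).symm))

theorem getElem?_pvColGet (g : List (List String)) (c r : Nat) :
    (pvColGet g c)[r]? = g[r]?.map (fun row => row.getD c "") := by
  simp [pvColGet, List.getElem?_map]

theorem pvColGet_getD {g : List (List String)} {r : Nat} (hr : r < g.length) (c : Nat) :
    (pvColGet g c).getD r "" = (g[r]).getD c "" := by
  rw [List.getD_eq_getElem?_getD, getElem?_pvColGet, List.getElem?_eq_getElem hr]
  rfl

theorem pvT_headD_length {w : Nat} {g : List (List String)} (hg : g ≠ [])
    (hr : pvRect w g) (hw : 0 < w) : ((pvT g).headD []).length = g.length := by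
  unfold pvT
  rw [pvHeadD_length hg hr, pvHeadD_map_range (pvColGet g) w [] hw]
  exact length_pvColGet g 0

theorem pvT_pvT {w : Nat} {g : List (List String)} (hg : g ≠ []) (hr : pvRect w g)
    (hw : 0 < w) : pvT (pvT g) = g := by
  apply List.ext_getElem?
  intro r
  show ((List.range ((pvT g).headD []).length).map (pvColGet (pvT g)))[r]? = g[r]?
  rw [pvT_headD_length hg hr hw]
  by_cases hrlen : r < g.length
  · rw [List.getElem?_map, List.getElem?_range hrlen, List.getElem?_eq_getElem hrlen]
    show some (pvColGet (pvT g) r) = _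
    congr 1
    unfold pvColGet pvT
    rw [List.map_map, pvHeadD_length hg hr]
    have hcg : ∀ c : Nat, (pvColGet g c).getD r "" = (g[r]).getD c "" :=
      fun c => pvColGet_getD hrlen c
    calc (List.range w).map ((fun row => row.getD r "") ∘ pvColGet g)
        = (List.range w).map (fun c => (g[r]).getD c "") :=
          List.map_congr_left (fun c _ => hcg c)
      _ = g[r] := by
          rw [← hr (g[r]) (List.getElem_mem hrlen)]
          exact pvMapRangeGetD_self (g[r]) ""
  · rw [List.getElem?_map,
      List.getElem?_eq_none (by simpa using hrlen),
      List.getElem?_eq_none (by simpa using hrlen)]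
    rfl

theorem pvT_map_reverse {w : Nat} {g : List (List String)} (hg : g ≠ [])
    (hr : pvRect w g) : pvT (g.map List.reverse) = (pvT g).reverse := by
  have hlen : ((g.map List.reverse).headD []).length = w :=
    pvHeadD_length (by simpa using hg) (pvRect_map _ (fun l => List.length_reverse) hr)
  have hTlen : (pvT g).length = w := length_pvT hg hr
  apply List.ext_getElem?
  intro c
  show ((List.range ((g.map List.reverse).headD []).length).map
      (pvColGet (g.map List.reverse)))[c]? = (pvT g).reverse[c]?
  rw [hlen]
  by_cases hc : c < w
  · rw [List.getElem?_map, List.getElem?_range hc,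
      List.getElem?_reverse (by rw [hTlen]; exact hc), hTlen]
    show some (pvColGet (g.map List.reverse) c) =
      ((List.range (g.headD []).length).map (pvColGet g))[w - 1 - c]?
    rw [pvHeadD_length hg hr, List.getElem?_map, List.getElem?_range (by omega)]
    show some _ = some (pvColGet g (w - 1 - c))
    congr 1
    unfold pvColGet
    rw [List.map_map]
    refine List.map_congr_left (fun row hrow => ?_)
    have hrl : row.length = w := hr row hrow
    simp only [Function.comp_def]
    rw [List.getD_eq_getElem _ _ (by rw [List.length_reverse]; omega),
      List.getD_eq_getElem _ _ (by omega),
      List.getElem_reverse]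
    congr 1
    omega
  · rw [List.getElem?_map,
      List.getElem?_eq_none (by simp only [List.length_range]; omega),
      List.getElem?_eq_none (by rw [List.length_reverse, hTlen]; omega)]
    rfl

-- rotation powers
theorem pvR2 {w : Nat} {g : List (List String)} (hg : g ≠ []) (hr : pvRect w g)
    (hw : 0 < w) : pvR (pvR g) = (g.reverse).map List.reverse := by
  rw [pvR_eq_pvT_map (pvR g), pvR_eq_pvT_reverse hg hr,
    pvT_pvT (by simp [hg]) (pvRect_reverse hr) hw]

theorem pvR3 {w : Nat} {g : List (List String)} (hg : g ≠ []) (hr : pvRect w g)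
    (hw : 0 < w) : pvR (pvR (pvR g)) = (pvT g).reverse := by
  rw [pvR2 hg hr hw,
    pvR_eq_pvT_reverse (by simp [hg]) (pvRect_map _ (fun l => List.length_reverse)
      (pvRect_reverse hr))]
  rw [← List.map_reverse, List.reverse_reverse]
  exact pvT_map_reverse hg hr

theorem pvR4 {w : Nat} {g : List (List String)} (hg : g ≠ []) (hr : pvRect w g)
    (hw : 0 < w) (_hh : 0 < g.length) : pvR (pvR (pvR (pvR g))) = g := by
  rw [pvR3 hg hr hw,
    pvR_eq_pvT_reverse
      (by simpa using pvT_ne_nil hg hr hw)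
      (pvRect_reverse (pvRect_pvT g)),
    List.reverse_reverse]
  exact pvT_pvT hg hr hw

-- ---- tilt commutation with rotation ----
theorem length_pvT_raw (g : List (List String)) : (pvT g).length = (g.headD []).length := by
  simp [pvT]

theorem pvE1 {w : Nat} {x : List (List String)} (hx : x ≠ []) (hrx : pvRect w x)
    (hw : 0 < w) (hh : 0 < x.length) :
    pvR (pvT ((pvT x).map slideLow)) = (pvR x).map slideHigh := by
  have hY_ne : (pvT x).map slideLow ≠ [] := by simpa using pvT_ne_nil hx hrx hw
  have hY_rect : pvRect x.length ((pvT x).map slideLow) :=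
    pvRect_map slideLow len_slideLow (pvRect_pvT x)
  rw [pvR_eq_pvT_map (pvT ((pvT x).map slideLow)), pvT_pvT hY_ne hY_rect hh,
    pvR_eq_pvT_map x, List.map_map, List.map_map]
  refine List.map_congr_left (fun l _ => ?_)
  simp only [Function.comp_def]
  exact (slideHigh_reverse l).symm

theorem pvE2 {w : Nat} {x : List (List String)} (hx : x ≠ []) (hrx : pvRect w x)
    (hw : 0 < w) :
    pvR (pvR (x.map slideLow)) = (pvR (pvR x)).map slideHigh := by
  have hxs_ne : x.map slideLow ≠ [] := by simpa using hx
  have hxs_rect : pvRect w (x.map slideLow) := pvRect_map slideLow len_slideLow hrx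
  rw [pvR2 hxs_ne hxs_rect hw, pvR2 hx hrx hw, ← List.map_reverse,
    List.map_map, List.map_map]
  refine List.map_congr_left (fun l _ => ?_)
  simp only [Function.comp_def]
  exact (slideHigh_reverse l).symm

theorem pvE3 {w : Nat} {x : List (List String)} (hx : x ≠ []) (hrx : pvRect w x)
    (hw : 0 < w) (hh : 0 < x.length) :
    pvR (pvR (pvR (pvT ((pvT x).map slideHigh)))) = (pvR (pvR (pvR x))).map slideHigh := by
  have hZ_ne : (pvT x).map slideHigh ≠ [] := by simpa using pvT_ne_nil hx hrx hw
  have hZ_rect : pvRect x.length ((pvT x).map slideHigh) :=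
    pvRect_map slideHigh len_slideHigh (pvRect_pvT x)
  have hZ_len : ((pvT x).map slideHigh).length = w := by
    rw [List.length_map, length_pvT hx hrx]
  have hTZ_ne : pvT ((pvT x).map slideHigh) ≠ [] := pvT_ne_nil hZ_ne hZ_rect hh
  have hTZ_rect : pvRect ((pvT x).map slideHigh).length (pvT ((pvT x).map slideHigh)) :=
    pvRect_pvT ((pvT x).map slideHigh)
  rw [pvR3 hTZ_ne hTZ_rect (by rw [hZ_len]; exact hw), pvT_pvT hZ_ne hZ_rect hh,
    pvR3 hx hrx hw, List.map_reverse]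

-- ---- bridges from the two ports to the algebraic forms ----
theorem rotateA_eq (g : List (List String)) : rotateA g = pvR g := by
  unfold rotateA pvR
  have hrange : PySem.List.pyRange ((g.length : Int) - 1) (-1) (-1) =
      (PySem.List.pyRange 0 ((g.length : Nat) : Int) 1).reverse := by
    rw [PySem.List.pyRange_neg_one_eq_reverse,
      show (-1 : Int) + 1 = 0 from by norm_num,
      show (g.length : Int) - 1 + 1 = ((g.length : Nat) : Int) from by ring]
  rw [hrange]
  simp only [PySem.List.pyRange_zero_natCast, List.map_reverse, List.map_map,
    Function.comp_def, PySem.List.pyGetD_natCast]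
  refine List.map_congr_left (fun c _ => ?_)
  congr 1
  exact pvMapRangeGetD g [] (fun row => row.getD c "")

theorem map_processColumn (g : List (List String)) :
    g.map processColumn = g.map slideHigh :=
  List.map_congr_left (fun l _ => processColumn_eq l)

theorem do_cycle_eq (grid : List (List String)) :
    do_cycle grid =
      pvR (pvR (pvR (pvR ((pvR ((pvR ((pvR ((pvR grid).map slideHigh)).map
        slideHigh)).map slideHigh)).map slideHigh)))) := by
  unfold do_cycle
  rw [show List.range 4 = [0, 1, 2, 3] from rfl, show List.range 3 = [0, 1, 2] from rfl]
  simp only [List.foldl_cons, List.foldl_nil, rotateA_eq, map_processColumn]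

theorem pvTiltBridge (x : List (List String)) (n : Nat) (hn : n = x.length)
    (sl : List String → List String) (hsl : ∀ l, (sl l).length = l.length)
    {w : Nat} (hx : x ≠ []) (hrx : pvRect w x) (hw : 0 < w) :
    (PySem.List.pyRange 0 ((n : Nat) : Int) 1).map (fun r =>
      (PySem.List.pyRange 0 ((w : Nat) : Int) 1).map (fun c =>
        PySem.List.pyGetD (PySem.List.pyGetD
          ((PySem.List.pyRange 0 ((w : Nat) : Int) 1).map (fun c' =>
            sl (x.map (fun row => PySem.List.pyGetD row c' "")))) c []) r "")) =
    pvT ((pvT x).map sl) := by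
  have hx_head : (x.headD []).length = w := pvHeadD_length hx hrx
  have hcols : (List.range w).map (fun c' =>
      sl (x.map (fun row => row.getD c' ""))) = (pvT x).map sl := by
    rw [pvT, hx_head, List.map_map]
    rfl
  have hClen : ((pvT x).map sl).length = w := by rw [List.length_map, length_pvT hx hrx]
  have hChead : (((pvT x).map sl).headD []).length = x.length := by
    rw [pvHeadD_map (pvT x) sl [] [] (pvT_ne_nil hx hrx hw), hsl,
      pvT_headD_length hx hrx hw]
  simp only [PySem.List.pyRange_zero_natCast, List.map_map, Function.comp_def,
    PySem.List.pyGetD_natCast]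
  rw [show (List.range w).map (fun c' =>
      sl (List.map (fun row => row.getD c' "") x)) = (pvT x).map sl from hcols]
  rw [show pvT ((pvT x).map sl) =
      (List.range n).map (pvColGet ((pvT x).map sl)) from by rw [pvT, hChead, ← hn]]
  refine List.map_congr_left (fun r _ => ?_)
  rw [← hClen]
  exact pvMapRangeGetD ((pvT x).map sl) [] (fun row => row.getD r "")

theorem do_cycle_alt_eq (grid : List (List String)) (hg : grid ≠ [])
    (hw : 0 < (grid.headD []).length) :
    do_cycle_alt grid =
      (pvT ((pvT ((pvT ((pvT (grid.map (fun row =>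
          (List.range (grid.headD []).length).map (fun c => row.getD c "")))).map
        slideLow)).map slideLow)).map slideHigh)).map slideHigh := by
  have hrect0 : pvRect (grid.headD []).length (grid.map (fun row =>
      (List.range (grid.headD []).length).map (fun c => row.getD c ""))) := by
    intro row hrow
    obtain ⟨r, _, rfl⟩ := List.mem_map.mp hrow
    simp
  have hne0 : grid.map (fun row =>
      (List.range (grid.headD []).length).map (fun c => row.getD c "")) ≠ [] := by
    simpa using hg
  have hh0 : 0 < (grid.map (fun row =>
      (List.range (grid.headD []).length).map (fun c => row.getD c ""))).length := by
    rw [List.length_map]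
    exact List.length_pos_of_ne_nil hg
  have hNlen : (pvT ((pvT (grid.map (fun row =>
      (List.range (grid.headD []).length).map (fun c => row.getD c "")))).map
        slideLow)).length =
      (grid.map (fun row =>
        (List.range (grid.headD []).length).map (fun c => row.getD c ""))).length := by
    rw [length_pvT_raw, pvHeadD_map _ slideLow [] [] (pvT_ne_nil hne0 hrect0 hw),
      len_slideLow, pvT_headD_length hne0 hrect0 hw]
  have hC1len : ((pvT (grid.map (fun row =>
      (List.range (grid.headD []).length).map (fun c => row.getD c "")))).map
        slideLow).length = (grid.headD []).length := by
    rw [List.length_map, length_pvT hne0 hrect0]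
  have hNrect : pvRect (grid.headD []).length (pvT ((pvT (grid.map (fun row =>
      (List.range (grid.headD []).length).map (fun c => row.getD c "")))).map
        slideLow)) := by
    have h := pvRect_pvT ((pvT (grid.map (fun row =>
      (List.range (grid.headD []).length).map (fun c => row.getD c "")))).map slideLow)
    rwa [hC1len] at h
  have hWlen : ((pvT ((pvT (grid.map (fun row =>
      (List.range (grid.headD []).length).map (fun c => row.getD c "")))).map
        slideLow)).map slideLow).length =
      (grid.map (fun row =>
        (List.range (grid.headD []).length).map (fun c => row.getD c ""))).length := by
    rw [List.length_map, hNlen]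
  have hWrect : pvRect (grid.headD []).length ((pvT ((pvT (grid.map (fun row =>
      (List.range (grid.headD []).length).map (fun c => row.getD c "")))).map
        slideLow)).map slideLow) := pvRect_map slideLow len_slideLow hNrect
  have hWne : (pvT ((pvT (grid.map (fun row =>
      (List.range (grid.headD []).length).map (fun c => row.getD c "")))).map
        slideLow)).map slideLow ≠ [] :=
    pvNeNilOfLen _ _ hWlen hh0
  have hcopy : grid.map (fun row =>
      (PySem.List.pyRange 0 (((grid.headD []).length : Nat) : Int) 1).map (fun c =>
        PySem.List.pyGetD row c "")) =
      grid.map (fun row =>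
        (List.range (grid.headD []).length).map (fun c => row.getD c "")) := by
    simp only [PySem.List.pyRange_zero_natCast, List.map_map, Function.comp_def,
      PySem.List.pyGetD_natCast]
  simp only [do_cycle_alt]
  rw [hcopy]
  rw [pvTiltBridge _ _ rfl slideLow len_slideLow hne0 hrect0 hw]
  rw [pvTiltBridge _ _ hWlen.symm slideHigh len_slideHigh hWne hWrect hw]

theorem pvChain (w : Nat) (g0 : List (List String)) (hne0 : g0 ≠ [])
    (hrect0 : pvRect w g0) (hw : 0 < w) (hh0 : 0 < g0.length) :
    pvR (pvR (pvR (pvR ((pvR ((pvR ((pvR ((pvR g0).map slideHigh)).map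
        slideHigh)).map slideHigh)).map slideHigh)))) =
    (pvT ((pvT ((pvT ((pvT g0).map slideLow)).map slideLow)).map slideHigh)).map
      slideHigh := by
  have hTg0_ne : pvT g0 ≠ [] := pvT_ne_nil hne0 hrect0 hw
  have hC1len : ((pvT g0).map slideLow).length = w := by
    rw [List.length_map, length_pvT hne0 hrect0]
  have hNrect : pvRect w (pvT ((pvT g0).map slideLow)) := by
    have h := pvRect_pvT ((pvT g0).map slideLow)
    rwa [hC1len] at h
  have hNlen : (pvT ((pvT g0).map slideLow)).length = g0.length := by
    rw [length_pvT_raw, pvHeadD_map _ slideLow [] [] hTg0_ne, len_slideLow,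
      pvT_headD_length hne0 hrect0 hw]
  have hNne : pvT ((pvT g0).map slideLow) ≠ [] := by
    intro e
    rw [e] at hNlen
    simp at hNlen
    omega
  have hWrect : pvRect w ((pvT ((pvT g0).map slideLow)).map slideLow) :=
    pvRect_map slideLow len_slideLow hNrect
  have hWlen : ((pvT ((pvT g0).map slideLow)).map slideLow).length = g0.length := by
    rw [List.length_map, hNlen]
  have hWne : (pvT ((pvT g0).map slideLow)).map slideLow ≠ [] := by
    simpa using hNne
  have hhW : 0 < ((pvT ((pvT g0).map slideLow)).map slideLow).length := by
    rw [hWlen]; exact hh0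
  have hTW_ne : pvT ((pvT ((pvT g0).map slideLow)).map slideLow) ≠ [] :=
    pvT_ne_nil hWne hWrect hw
  have hC2len : ((pvT ((pvT ((pvT g0).map slideLow)).map slideLow)).map
      slideHigh).length = w := by
    rw [List.length_map, length_pvT hWne hWrect]
  have hSrect : pvRect w (pvT ((pvT ((pvT ((pvT g0).map slideLow)).map
      slideLow)).map slideHigh)) := by
    have h := pvRect_pvT ((pvT ((pvT ((pvT g0).map slideLow)).map slideLow)).map
      slideHigh)
    rwa [hC2len] at h
  have hSlen : (pvT ((pvT ((pvT ((pvT g0).map slideLow)).map slideLow)).map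
      slideHigh)).length = g0.length := by
    rw [length_pvT_raw, pvHeadD_map _ slideHigh [] [] hTW_ne, len_slideHigh,
      pvT_headD_length hWne hWrect hw, hWlen]
  have hSne : pvT ((pvT ((pvT ((pvT g0).map slideLow)).map slideLow)).map
      slideHigh) ≠ [] := by
    intro e
    rw [e] at hSlen
    simp at hSlen
    omega
  have hhS : 0 < (pvT ((pvT ((pvT ((pvT g0).map slideLow)).map slideLow)).map
      slideHigh)).length := by
    rw [hSlen]; exact hh0
  have hFrect : pvRect w ((pvT ((pvT ((pvT ((pvT g0).map slideLow)).map
      slideLow)).map slideHigh)).map slideHigh) :=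
    pvRect_map slideHigh len_slideHigh hSrect
  have hFne : (pvT ((pvT ((pvT ((pvT g0).map slideLow)).map slideLow)).map
      slideHigh)).map slideHigh ≠ [] := by
    simpa using hSne
  have hhF : 0 < ((pvT ((pvT ((pvT ((pvT g0).map slideLow)).map slideLow)).map
      slideHigh)).map slideHigh).length := by
    rw [List.length_map, hSlen]; exact hh0
  rw [← pvE1 hne0 hrect0 hw hh0,
    ← pvE2 hNne hNrect hw,
    ← pvE3 hWne hWrect hw hhW,
    pvR4 hSne hSrect hw hhS,
    pvR4 hFne hFrect hw hhF]

-- ===== VERDICT (by name: the statement is the Claim_ definition above) =====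
theorem do_cycle_spec : Claim_equal_do_cycle := by
  unfold Claim_equal_do_cycle Spec_do_cycle
  intro grid _ hpre
  obtain ⟨hg, hwpos, hrows⟩ := hpre
  have hrect0 : pvRect (grid.headD []).length (grid.map (fun row =>
      (List.range (grid.headD []).length).map (fun c => row.getD c ""))) := by
    intro row hrow
    obtain ⟨r, _, rfl⟩ := List.mem_map.mp hrow
    simp
  have hne0 : grid.map (fun row =>
      (List.range (grid.headD []).length).map (fun c => row.getD c "")) ≠ [] := by
    simpa using hg
  have hh0 : 0 < (grid.map (fun row =>
      (List.range (grid.headD []).length).map (fun c => row.getD c ""))).length := by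
    rw [List.length_map]
    exact List.length_pos_of_ne_nil hg
  have hRg : pvR grid = pvR (grid.map (fun row =>
      (List.range (grid.headD []).length).map (fun c => row.getD c ""))) := by
    unfold pvR
    rw [pvHeadD_length hne0 hrect0]
    refine List.map_congr_left (fun c hc => ?_)
    have hcw : c < (grid.headD []).length := List.mem_range.mp hc
    congr 1
    unfold pvColGet
    rw [List.map_map]
    refine List.map_congr_left (fun row _ => ?_)
    simp only [Function.comp_def]
    exact (pvGetD_map_range (fun c' => row.getD c' "") ((grid.headD []).length) c "" hcw).symm
  rw [do_cycle_eq grid, do_cycle_alt_eq grid hg hwpos, hRg,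
    pvChain (grid.headD []).length _ hne0 hrect0 hwpos hh0]

theorem do_cycle_raises : Claim_raises_do_cycle := by
  unfold Claim_raises_do_cycle
  refine ⟨?_, by decide⟩
  intro g _ hr hp
  obtain ⟨_, h0⟩ := hr
  obtain ⟨_, hpos, _⟩ := hp
  omega

theorem pvRaiseWitness_do_cycle_ok :
    Raises_do_cycle pvRaiseWitness_do_cycle ∧
      do_cycle_alt pvRaiseWitness_do_cycle = pvRaiseWitnessOut_do_cycle :=
  ⟨do_cycle_raises.2.2.1, do_cycle_raises.2.2.2⟩
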